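-- pv_equiv track=rewrite | github.com/qpwoeirut/CTFs | LITCTF/2025/crypto/cubic-shuffle/solve_cubic_shuffle.py | all_solutions
-- ===== SOURCE A (Python) =====
-- import string
-- from typing import Generator
--
-- og = string.ascii_letters + "01"
--
-- def all_solutions(s: str, best: dict[str, tuple[str]]) -> Generator[str, None, None]:
--     if len(s) == len(og):
--         yield s
--     else:
--         c = og[len(s)]
--         actual_options = [val for val, expected_options in best.items() if c in expected_options] or ['?']
--         for option in actual_options:
--             yield from all_solutions(s + option, best)
-- ===== SOURCE B (Python) =====
-- import string
--
-- og = string.ascii_letters + "01"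
--
-- def all_solutions(s: str, best: dict[str, tuple[str]]):
--     # Per-position decomposition: precompute the option list for every remaining
--     # position, then enumerate the cartesian product (first position varies slowest,
--     # matching the recursion's yield order).
--     option_lists = [
--         [val for val, opts in best.items() if c in opts] or ['?']
--         for c in og[len(s):]
--     ]
--     combos = [()]
--     for options in option_lists:
--         combos = [cb + (o,) for cb in combos for o in options]
--     for cb in combos:
--         yield s + ''.join(cb)
-- ===== Notes on version B (the rewrite author's own statement) =====
-- stated objective: alternative
-- what changed: Replaces the branching recursion (one call per partial string) by a flat two-phase enumeration: precompute the option list for each remaining position once, then build the cartesian product iteratively and emit s plus each joined combination.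
import Mathlib
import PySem

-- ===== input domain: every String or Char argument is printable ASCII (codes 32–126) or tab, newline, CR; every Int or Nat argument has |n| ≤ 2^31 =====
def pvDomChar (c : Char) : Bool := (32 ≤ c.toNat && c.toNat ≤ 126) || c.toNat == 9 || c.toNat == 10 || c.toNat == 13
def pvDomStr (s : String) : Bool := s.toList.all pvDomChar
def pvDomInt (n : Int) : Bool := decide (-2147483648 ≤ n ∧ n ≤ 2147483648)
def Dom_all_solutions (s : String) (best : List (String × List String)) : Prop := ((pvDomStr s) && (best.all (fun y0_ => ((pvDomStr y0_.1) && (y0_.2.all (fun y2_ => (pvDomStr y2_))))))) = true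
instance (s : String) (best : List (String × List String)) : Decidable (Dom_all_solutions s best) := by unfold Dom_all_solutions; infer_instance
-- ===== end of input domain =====

-- B re-derives the recursion as a two-phase enumeration (per-position option lists, then an
-- iterative cartesian product); equivalence of RETURN values (the generators, listed) is proved on Pre_.

-- og = string.ascii_letters + "01"
def pvOg : List Char := ['a', 'b', 'c', 'd', 'e', 'f', 'g', 'h', 'i', 'j', 'k', 'l', 'm', 'n', 'o', 'p', 'q', 'r', 's', 't', 'u', 'v', 'w', 'x', 'y', 'z', 'A', 'B', 'C', 'D', 'E', 'F', 'G', 'H', 'I', 'J', 'K', 'L', 'M', 'N', 'O', 'P', 'Q', 'R', 'S', 'T', 'U', 'V', 'W', 'X', 'Y', 'Z', '0', '1']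

-- best.items(): the dict built from the association list (last value wins, first position kept)
def pvItems (best : List (String × List String)) : List (String × List String) :=
  (PySem.Dict.ofList best).items

-- ===== PORT A =====
-- the recursive generator, collected into a list; fuel only makes the recursion structural
-- (inside Pre_ every recursive call grows s by exactly one character, so depth ≤ 55);
-- the `none` branch of og[len(s)] is Python's IndexError, excluded by Pre_.
def allSolutionsGo (best : List (String × List String)) : Nat → List Char → List (List Char)
  | 0, _ => []
  | fuel+1, s =>
    if s.length = pvOg.length then [s]
    else
      -- c = og[len(s)]: a nonnegative index, so og[len(s)] is exactly pvOg[s.length]?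
      -- (PySem.List.pyGet?_natCast); none = Python's IndexError
      match pvOg[s.length]? with
      | none => []  -- IndexError: outside Pre_
      | some c =>
        let actual_options := (pvItems best |>.filter (fun p => String.ofList [c] ∈ p.2)).map (·.1)
        let actual_options := if actual_options = [] then ["?"] else actual_options
        actual_options.flatMap (fun option => allSolutionsGo best fuel (s ++ option.toList))

def all_solutions (s : String) (best : List (String × List String)) : List String :=
  (allSolutionsGo best 55 s.toList).map String.ofList

-- ===== PORT B =====
-- Source B: precompute option_lists for og[len(s):], fold the cartesian product forward
-- (combo = tuple of option strings, kept as List (List Char); ''.join = flatten), then map s + join.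
def all_solutions_alt (s : String) (best : List (String × List String)) : List String :=
  let cs := s.toList
  let optionLists : List (List (List Char)) :=
    (pvOg.drop cs.length).map (fun c =>
      let l := (pvItems best |>.filter (fun p => String.ofList [c] ∈ p.2)).map (fun p => p.1.toList)
      if l = [] then [['?']] else l)
  let combos := optionLists.foldl
    (fun combos options => combos.flatMap (fun cb => options.map (fun o => cb ++ [o])))
    [([] : List (List Char))]
  combos.map (fun cb => String.ofList (cs ++ cb.flatten))

-- ===== PRECONDITION & SPEC =====
-- Pre_ excludes (a) len(s) > 54, where A raises IndexError, and (b) inputs where some dict key of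
-- length ≠ 1 is selectable at a remaining position: there A's stride-by-len(key) recursion skips or
-- overshoots positions (raising IndexError, recursing forever on an empty key, or accidentally
-- landing on 54), outside the per-character domain the solver is written for.
def Pre_all_solutions (s : String) (best : List (String × List String)) : Prop :=
  s.toList.length ≤ 54 ∧
  ∀ p ∈ pvItems best,
    (pvOg.drop s.toList.length).any (fun c => decide (String.ofList [c] ∈ p.2)) = true →
      p.1.toList.length = 1
instance (s : String) (best : List (String × List String)) : Decidable (Pre_all_solutions s best) := by unfold Pre_all_solutions; infer_instance

def pvWitness_all_solutions : String × (List (String × List String)) := ("", [])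

def Spec_all_solutions (s : String) (best : List (String × List String)) (out : List String) : Prop := out = all_solutions_alt s best
instance (s : String) (best : List (String × List String)) (out : List String) : Decidable (Spec_all_solutions s best out) := by unfold Spec_all_solutions; infer_instance

-- ===== CLAIM =====
def Claim_equal_all_solutions : Prop := ∀ (s : String) (best : List (String × List String)), Dom_all_solutions s best → Pre_all_solutions s best → Spec_all_solutions s best (all_solutions s best)

-- ===== LEMMAS AND PROOFS =====

-- right-nested cartesian product (reference shape for the proof)
def pvProd : List (List (List Char)) → List (List (List Char))
  | [] => [[]]
  | l :: ls => l.flatMap (fun x => (pvProd ls).map (x :: ·))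

lemma pvFoldl_prod (ls : List (List (List Char))) (init : List (List (List Char))) :
    ls.foldl (fun combos options => combos.flatMap (fun cb => options.map (fun o => cb ++ [o]))) init
      = init.flatMap (fun cb => (pvProd ls).map (fun t => cb ++ t)) := by
  induction ls generalizing init with
  | nil => simp [pvProd]
  | cons l ls ih =>
    simp only [List.foldl_cons, ih, pvProd]
    simp [List.flatMap_assoc, List.map_flatMap, List.flatMap_map, Function.comp_def]

lemma pvGo_eq (best : List (String × List String)) (fuel : Nat) (cs : List Char)
    (h1 : cs.length ≤ 54) (h2 : 54 - cs.length < fuel)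
    (h3 : ∀ p ∈ pvItems best,
      (pvOg.drop cs.length).any (fun c => decide (String.ofList [c] ∈ p.2)) = true →
        p.1.toList.length = 1) :
    allSolutionsGo best fuel cs
      = (pvProd ((pvOg.drop cs.length).map (fun c =>
          let l := (pvItems best |>.filter (fun p => String.ofList [c] ∈ p.2)).map (fun p => p.1.toList)
          if l = [] then [['?']] else l))).map (fun cb => cs ++ cb.flatten) := by
  induction fuel generalizing cs with
  | zero => omega
  | succ fuel ih =>
    by_cases hlen : cs.length = pvOg.length
    · -- base case: len(s) == len(og) == 54, no remaining positions
      simp [allSolutionsGo, hlen, pvProd]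
    · have h54 : pvOg.length = 54 := rfl
      have hlt : cs.length < pvOg.length := by omega
      have hget : pvOg[cs.length]? = some pvOg[cs.length] := List.getElem?_eq_getElem hlt
      have hcons : pvOg.drop cs.length = pvOg[cs.length] :: pvOg.drop (cs.length + 1) :=
        (List.getElem_cons_drop hlt).symm
      set c := pvOg[cs.length] with hc
      set optsA := (pvItems best |>.filter (fun p => String.ofList [c] ∈ p.2)).map (·.1) with hoptsA
      set optsF := if optsA = [] then ["?"] else optsA with hoptsF
      -- every chosen option is a single character
      have hone : ∀ o ∈ optsF, o.toList.length = 1 := by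
        intro o ho
        rw [hoptsF] at ho
        split at ho
        · simp at ho; subst ho; rfl
        · rw [hoptsA] at ho
          simp only [List.mem_map] at ho
          obtain ⟨p, hp, rfl⟩ := ho
          have hp' := List.mem_of_mem_filter hp
          have hcond : String.ofList [c] ∈ p.2 := by
            have := List.of_mem_filter hp; simpa using this
          refine h3 p hp' (List.any_eq_true.mpr ⟨c, ?_, by simpa using hcond⟩)
          rw [hcons]; exact List.mem_cons_self
      -- unfold one step of A
      have hA : allSolutionsGo best (fuel + 1) cs
          = optsF.flatMap (fun o => allSolutionsGo best fuel (cs ++ o.toList)) := by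
        simp only [allSolutionsGo, if_neg hlen, hget]
        rw [← hoptsA, ← hoptsF]
      rw [hA, hcons]
      simp only [List.map_cons, pvProd]
      -- the head option list equals optsF rendered as char lists
      have hfc : ((pvItems best |>.filter (fun p => String.ofList [c] ∈ p.2)).map (fun p => p.1.toList))
          = optsA.map String.toList := by
        rw [hoptsA, List.map_map]; rfl
      have hfc2 : (if (pvItems best |>.filter (fun p => String.ofList [c] ∈ p.2)).map (fun p => p.1.toList) = [] then [['?']]
            else (pvItems best |>.filter (fun p => String.ofList [c] ∈ p.2)).map (fun p => p.1.toList))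
          = optsF.map String.toList := by
        rw [hfc, hoptsF]
        by_cases he : optsA = [] <;> simp [he]
      rw [hfc2]
      have hstep : ∀ o ∈ optsF, allSolutionsGo best fuel (cs ++ o.toList)
          = (pvProd ((pvOg.drop (cs.length + 1)).map (fun c =>
              let l := (pvItems best |>.filter (fun p => String.ofList [c] ∈ p.2)).map (fun p => p.1.toList)
              if l = [] then [['?']] else l))).map (fun cb => (cs ++ o.toList) ++ cb.flatten) := by
        intro o ho
        have hl : (cs ++ o.toList).length = cs.length + 1 := by
          rw [List.length_append, hone o ho]
        have hrec := ih (cs ++ o.toList) (by omega) (by omega)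
          (by
            intro p hp hex
            rw [hl] at hex
            obtain ⟨c', hc', hm⟩ := List.any_eq_true.mp hex
            refine h3 p hp (List.any_eq_true.mpr ⟨c', ?_, hm⟩)
            rw [hcons]; exact List.mem_cons_of_mem _ hc')
        rw [hl] at hrec
        exact hrec
      rw [List.flatMap_congr hstep]
      simp [List.map_flatMap, List.flatMap_map, Function.comp_def]

-- ===== VERDICT =====
theorem all_solutions_spec : Claim_equal_all_solutions := by
  intro s best _hdom hpre
  obtain ⟨h1, h3⟩ := hpre
  unfold Spec_all_solutions all_solutions all_solutions_alt
  simp only [pvGo_eq best 55 s.toList h1 (by omega) h3]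
  simp [pvFoldl_prod, Function.comp_def]
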